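-- pv_equiv track=rewrite | github.com/amazon-science/doc-mt-metrics | bert_score/add_context.py | add_context
-- ===== SOURCE A (Python) =====
-- from typing import List
--
-- def add_context(org_txt: List[str], context: List[str], docs: List[str], sep_token: str = "</s>",
--                 ws: int = 2) -> List[str]:
--     """Function that adds the previous sentences as context to the current sentence, respecting document boundaries
--     :param org_txt: the original text
--     :param context: the text from which the context will be taken (same as org_txt for source/reference)
--     :param docs: the document where each segment belongs to
--     :param sep_token: the separator token of the tokenizer for the specific model
--     :param ws: the window size, maximum of the previous sentences to be considered as context
--     :return: the original text augmented with context
--     """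
--     i, k = 0, 0
--     augm_txt = []
--     doc_id = docs[0]
--     while i < len(org_txt):
--         if docs[i] == doc_id:
--             context_window = context[i - min(k, ws):i]
--             augm_txt.append(" {} ".format(sep_token).join(context_window + [org_txt[i]]))
--             i += 1
--         else:
--             doc_id = docs[i]
--             k = -1
--         k += 1
--     return augm_txt
-- ===== SOURCE B (Python) =====
-- def add_context(org_txt, context, docs, sep_token="</s>", ws=2):
--     sep = " {} ".format(sep_token)
--     # Phase 1: split the index range into maximal runs of equal document ids.
--     runs, start, cur = [], 0, docs[0]
--     for i in range(len(org_txt)):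
--         if docs[i] != cur:
--             runs.append((start, i))
--             start, cur = i, docs[i]
--     runs.append((start, len(org_txt)))
--     # Phase 2: within each run, join up to ws preceding sentences with the current one.
--     out = []
--     for s, t in runs:
--         for i in range(s, t):
--             out.append(sep.join(context[max(s, i - ws):i] + [org_txt[i]]))
--     return out
-- ===== Notes on version B (the rewrite author's own statement) =====
-- stated objective: alternative
-- what changed: B works in two staged passes -- first it computes the list of maximal document-run index intervals, then it iterates over each run emitting the sep-joined window clipped at the run start -- whereas A interleaves a counter k with no-increment reprocessing on document changes in a single while-loop.
import Mathlib
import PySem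

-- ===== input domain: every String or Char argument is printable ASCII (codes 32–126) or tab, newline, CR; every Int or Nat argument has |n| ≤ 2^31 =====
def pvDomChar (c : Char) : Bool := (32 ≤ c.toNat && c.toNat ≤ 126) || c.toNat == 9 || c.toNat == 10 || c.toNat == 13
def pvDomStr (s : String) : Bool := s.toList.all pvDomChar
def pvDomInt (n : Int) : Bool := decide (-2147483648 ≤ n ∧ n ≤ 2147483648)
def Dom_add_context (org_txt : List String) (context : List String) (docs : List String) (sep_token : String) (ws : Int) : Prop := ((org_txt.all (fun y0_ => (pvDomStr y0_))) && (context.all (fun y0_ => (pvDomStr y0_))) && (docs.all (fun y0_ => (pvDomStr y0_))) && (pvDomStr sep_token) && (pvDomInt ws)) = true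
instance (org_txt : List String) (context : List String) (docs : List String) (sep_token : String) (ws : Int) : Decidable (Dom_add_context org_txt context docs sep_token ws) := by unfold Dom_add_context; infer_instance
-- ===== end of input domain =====

-- B restructures A's single while-loop (counter k, no-increment reprocessing on document
-- changes) into two staged passes: compute the maximal document-run intervals first, then
-- emit the windows run by run (objective: alternative decomposition, same cost).

-- ===== PORT A =====
-- A's while-loop: state (i, k, doc_id, augm_txt); on a document change the index is NOT
-- advanced (doc_id and k are reset and the same i is reprocessed).  Indexing docs[i] /
-- org_txt[i] is written with getD: under Pre_ (below) every such index is in range, so this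
-- is exact there (Python raises IndexError outside Pre_).
def addContextLoopA (org_txt : List String) (context : List String) (docs : List String)
    (sep : String) (ws : Int) (i : Nat) (k : Int) (doc_id : String) (augm : List String) :
    List String :=
  if h : i < org_txt.length then
    if docs.getD i "" == doc_id then
      addContextLoopA org_txt context docs sep ws (i + 1) (k + 1) doc_id
        (augm ++ [PySem.Str.join sep
          (PySem.List.slice context (some ((i : Int) - min k ws)) (some (i : Int))
            ++ [org_txt.getD i ""])])
    else
      addContextLoopA org_txt context docs sep ws i 0 (docs.getD i "") augm
  else
    augm
termination_by (org_txt.length - i) * 2 + (if docs.getD i "" == doc_id then 0 else 1)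
decreasing_by
  · have : (if docs.getD (i+1) "" == doc_id then 0 else 1) ≤ 1 := by split <;> omega
    omega
  · simp_all

def add_context (org_txt : List String) (context : List String) (docs : List String)
    (sep_token : String) (ws : Int) : List String :=
  addContextLoopA org_txt context docs (" " ++ sep_token ++ " ") ws 0 0 (docs.getD 0 "") []

-- ===== PORT B =====
-- B (Source B): phase 1 folds over range(len(org_txt)) with state (runs, start, cur) collecting
-- maximal run intervals; phase 2 folds over the runs, and over range(s, t) inside each run,
-- appending the joined window clipped at the run start.  docs is only read at in-range
-- indices under Pre_ (getD is exact there).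
def add_context_alt (org_txt : List String) (context : List String) (docs : List String)
    (sep_token : String) (ws : Int) : List String :=
  let sep := " " ++ sep_token ++ " "
  let st := (List.range org_txt.length).foldl
    (fun (st : List (Nat × Nat) × Nat × String) i =>
      if docs.getD i "" ≠ st.2.2 then (st.1 ++ [(st.2.1, i)], i, docs.getD i "") else st)
    ([], 0, docs.getD 0 "")
  let runs := st.1 ++ [(st.2.1, org_txt.length)]
  runs.foldl (fun out r =>
    (List.range' r.1 (r.2 - r.1)).foldl (fun (out : List String) (i : Nat) =>
      out ++ [PySem.Str.join sep
        (PySem.List.slice context (some (max ((r.1 : Nat) : Int) ((i : Int) - ws)))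
          (some (i : Int)) ++ [org_txt.getD i ""])]) out) []

-- ===== PRECONDITION & SPEC =====
-- Pre_ is exactly both programs' return domain: Python A (and B) reads docs[0] before the
-- loop and docs[i] for every i < len(org_txt), raising IndexError when docs is empty or
-- shorter than org_txt.
def Pre_add_context (org_txt : List String) (context : List String) (docs : List String) (sep_token : String) (ws : Int) : Prop :=
  docs ≠ [] ∧ org_txt.length ≤ docs.length
instance (org_txt : List String) (context : List String) (docs : List String) (sep_token : String) (ws : Int) : Decidable (Pre_add_context org_txt context docs sep_token ws) := by unfold Pre_add_context; infer_instance

def pvWitness_add_context : List String × List String × List String × String × Int :=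
  (["a", "b", "c"], ["p", "q", "r"], ["d1", "d1", "d2"], "</s>", 2)

def Spec_add_context (org_txt : List String) (context : List String) (docs : List String) (sep_token : String) (ws : Int) (out : List String) : Prop := out = add_context_alt org_txt context docs sep_token ws
instance (org_txt : List String) (context : List String) (docs : List String) (sep_token : String) (ws : Int) (out : List String) : Decidable (Spec_add_context org_txt context docs sep_token ws out) := by unfold Spec_add_context; infer_instance

-- ===== CLAIM =====
def Claim_equal_add_context : Prop := ∀ (org_txt : List String) (context : List String) (docs : List String) (sep_token : String) (ws : Int), Dom_add_context org_txt context docs sep_token ws → Pre_add_context org_txt context docs sep_token ws → Spec_add_context org_txt context docs sep_token ws (add_context org_txt context docs sep_token ws)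

-- ===== LEMMAS AND PROOFS =====

-- start index of the document run containing position i
def runStart (docs : List String) : Nat → Nat
  | 0 => 0
  | i + 1 => if docs.getD (i + 1) "" == docs.getD i "" then runStart docs i else i + 1

lemma runStart_succ (docs : List String) (i : Nat) :
    runStart docs (i + 1) = if docs.getD (i + 1) "" == docs.getD i "" then runStart docs i
      else i + 1 := rfl

lemma runStart_le (docs : List String) (i : Nat) : runStart docs i ≤ i := by
  induction i with
  | zero => simp [runStart]
  | succ n ih => unfold runStart; split <;> omega

-- the common value both programs append at position i
def elemAt (org_txt context docs : List String) (sep : String) (ws : Int) (i : Nat) : String :=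
  PySem.Str.join sep
    (PySem.List.slice context (some (max ((runStart docs i : Int)) ((i : Int) - ws))) (some (i : Int))
      ++ [org_txt.getD i ""])

lemma loopA_eq (org_txt context docs : List String) (sep : String) (ws : Int) :
    ∀ (m i : Nat) (k : Int) (doc_id : String) (augm : List String),
      (org_txt.length - i) * 2 + (if docs.getD i "" == doc_id then 0 else 1) ≤ m →
      (if docs.getD i "" == doc_id then k = (i : Int) - (runStart docs i : Int)
       else 0 < i ∧ doc_id = docs.getD (i - 1) "") →
      addContextLoopA org_txt context docs sep ws i k doc_id augm =
        augm ++ (List.range' i (org_txt.length - i)).map (elemAt org_txt context docs sep ws) := by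
  intro m
  induction m with
  | zero =>
    intro i k doc_id augm hm _
    have hge : ¬ i < org_txt.length := by
      by_contra h
      have h1 : (if docs.getD i "" == doc_id then 0 else 1) ≥ 0 := by split <;> omega
      omega
    rw [addContextLoopA]
    simp [hge, Nat.sub_eq_zero_of_le (Nat.le_of_not_lt hge)]
  | succ m ih =>
    intro i k doc_id augm hm hinv
    rw [addContextLoopA]
    by_cases hlt : i < org_txt.length
    · simp only [hlt, dif_pos]
      by_cases heq : docs.getD i "" == doc_id
      · simp only [heq, if_pos]
        have hk : k = (i : Int) - (runStart docs i : Int) := by rwa [if_pos heq] at hinv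
        have hrs := runStart_le docs i
        have harg : (i : Int) - min k ws = max ((runStart docs i : Int)) ((i : Int) - ws) := by
          omega
        have hinv' : (if docs.getD (i+1) "" == doc_id then
              k + 1 = ((i+1 : Nat) : Int) - (runStart docs (i+1) : Int)
            else 0 < i + 1 ∧ doc_id = docs.getD ((i+1) - 1) "") := by
          by_cases h2 : docs.getD (i+1) "" == doc_id
          · have hdi : docs.getD i "" = doc_id := eq_of_beq heq
            have h2' : (docs.getD (i+1) "" == docs.getD i "") = true := by
              rw [hdi]; exact h2
            rw [if_pos h2]
            rw [runStart_succ, if_pos h2']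
            push_cast; omega
          · rw [if_neg h2]
            exact ⟨Nat.succ_pos i, by simpa using (eq_of_beq heq).symm⟩
        have hm' : (org_txt.length - (i+1)) * 2 +
            (if docs.getD (i+1) "" == doc_id then 0 else 1) ≤ m := by
          have h1 : (if docs.getD (i+1) "" == doc_id then (0:Nat) else 1) ≤ 1 := by
            split <;> omega
          have h0 : (if docs.getD i "" == doc_id then (0:Nat) else 1) = 0 := by
            rw [if_pos heq]
          omega
        rw [ih (i+1) (k+1) doc_id _ hm' hinv']
        have hrange : List.range' i (org_txt.length - i) =
            i :: List.range' (i+1) (org_txt.length - (i+1)) := by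
          have : org_txt.length - i = (org_txt.length - (i+1)) + 1 := by omega
          rw [this, List.range'_succ]
        rw [hrange]
        simp [elemAt, harg]
      · rw [if_neg heq]
        have hpos : 0 < i ∧ doc_id = docs.getD (i - 1) "" := by rwa [if_neg heq] at hinv
        have hinv' : (if docs.getD i "" == docs.getD i "" then
              (0 : Int) = (i : Int) - (runStart docs i : Int)
            else 0 < i ∧ docs.getD i "" = docs.getD (i - 1) "") := by
          have hne : ¬ docs.getD i "" == docs.getD (i - 1) "" := by
            rw [← hpos.2]; exact heq
          have : runStart docs i = i := by
            obtain ⟨hp, _⟩ := hpos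
            obtain ⟨j, rfl⟩ : ∃ j, i = j + 1 := ⟨i - 1, by omega⟩
            simp only [Nat.add_sub_cancel] at hne
            rw [runStart_succ, if_neg hne]
          simp [this]
        have hm' : (org_txt.length - i) * 2 +
            (if docs.getD i "" == docs.getD i "" then 0 else 1) ≤ m := by
          have h1 : (if docs.getD i "" == doc_id then (0:Nat) else 1) = 1 := by
            rw [if_neg heq]
          simp only [beq_self_eq_true, if_pos]
          omega
        rw [ih i 0 (docs.getD i "") augm hm' hinv']
    · simp [hlt, Nat.sub_eq_zero_of_le (Nat.le_of_not_lt hlt)]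

-- the elements phase 2 of B emits for one run interval [s, t)
def procRun (org_txt context : List String) (sep : String) (ws : Int) (r : Nat × Nat) :
    List String :=
  (List.range' r.1 (r.2 - r.1)).map (fun (i : Nat) => PySem.Str.join sep
    (PySem.List.slice context (some (max ((r.1 : Nat) : Int) ((i : Int) - ws)))
      (some (i : Int)) ++ [org_txt.getD i ""]))

lemma inner_foldl_eq (org_txt context : List String) (sep : String) (ws : Int)
    (r : Nat × Nat) : ∀ (l : List Nat) (out : List String),
    l.foldl (fun (out : List String) (i : Nat) =>
      out ++ [PySem.Str.join sep
        (PySem.List.slice context (some (max ((r.1 : Nat) : Int) ((i : Int) - ws)))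
          (some (i : Int)) ++ [org_txt.getD i ""])]) out =
    out ++ l.map (fun (i : Nat) => PySem.Str.join sep
      (PySem.List.slice context (some (max ((r.1 : Nat) : Int) ((i : Int) - ws)))
        (some (i : Int)) ++ [org_txt.getD i ""])) := by
  intro l
  induction l with
  | nil => simp
  | cons a l ih =>
    intro out
    rw [List.foldl_cons, ih, List.map_cons, List.append_assoc]
    rfl

lemma outer_foldl_eq (org_txt context : List String) (sep : String) (ws : Int) :
    ∀ (runs : List (Nat × Nat)) (out : List String),
    runs.foldl (fun out r =>
      (List.range' r.1 (r.2 - r.1)).foldl (fun (out : List String) (i : Nat) =>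
        out ++ [PySem.Str.join sep
          (PySem.List.slice context (some (max ((r.1 : Nat) : Int) ((i : Int) - ws)))
            (some (i : Int)) ++ [org_txt.getD i ""])]) out) out =
    out ++ runs.flatMap (procRun org_txt context sep ws) := by
  intro runs
  induction runs with
  | nil => simp
  | cons r runs ih =>
    intro out
    simp only [List.foldl_cons, List.flatMap_cons]
    rw [inner_foldl_eq, ih, procRun, List.append_assoc]

-- one step of extending a run interval on the right
lemma procRun_snoc (org_txt context : List String) (sep : String) (ws : Int) (s n : Nat)
    (h : s ≤ n) :
    procRun org_txt context sep ws (s, n + 1) =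
      procRun org_txt context sep ws (s, n) ++
        [PySem.Str.join sep
          (PySem.List.slice context (some (max ((s : Nat) : Int) ((n : Int) - ws)))
            (some (n : Int)) ++ [org_txt.getD n ""])] := by
  unfold procRun
  have h1 : n + 1 - s = (n - s) + 1 := by omega
  have h2 : List.range' s ((n - s) + 1) = List.range' s (n - s) ++ [s + (n - s)] :=
    List.range'_1_concat
  have h3 : s + (n - s) = n := by omega
  simp [h1, h2, h3]

-- phase-1 invariant: after folding range n the state (runs, start, cur) satisfies
-- start = runStart docs (n-1), cur = docs[n-1] (both read as 0 for n = 0), and the runs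
-- collected so far plus the open run [start, n) yield exactly the first n output elements.
lemma phase1_inv (org_txt context docs : List String) (sep : String) (ws : Int) :
    ∀ (n : Nat),
      ((List.range n).foldl
        (fun (st : List (Nat × Nat) × Nat × String) i =>
          if docs.getD i "" ≠ st.2.2 then (st.1 ++ [(st.2.1, i)], i, docs.getD i "") else st)
        ([], 0, docs.getD 0 "")).2.1 = runStart docs (n - 1) ∧
      ((List.range n).foldl
        (fun (st : List (Nat × Nat) × Nat × String) i =>
          if docs.getD i "" ≠ st.2.2 then (st.1 ++ [(st.2.1, i)], i, docs.getD i "") else st)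
        ([], 0, docs.getD 0 "")).2.2 = docs.getD (n - 1) "" ∧
      ((List.range n).foldl
        (fun (st : List (Nat × Nat) × Nat × String) i =>
          if docs.getD i "" ≠ st.2.2 then (st.1 ++ [(st.2.1, i)], i, docs.getD i "") else st)
        ([], 0, docs.getD 0 "")).1.flatMap (procRun org_txt context sep ws) ++
        procRun org_txt context sep ws (runStart docs (n - 1), n) =
      (List.range n).map (elemAt org_txt context docs sep ws) := by
  intro n
  induction n with
  | zero => simp [runStart, procRun]
  | succ n ih =>
    obtain ⟨hs, hc, hall⟩ := ih
    rw [List.range_succ, List.foldl_append, List.foldl_cons, List.foldl_nil]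
    by_cases hch : docs.getD n "" ≠ docs.getD (n - 1) ""
    · -- document change at n (forces 0 < n)
      have hn : 0 < n := by
        by_contra h
        have : n = 0 := by omega
        subst this; simp at hch
      obtain ⟨j, rfl⟩ : ∃ j, n = j + 1 := ⟨n - 1, by omega⟩
      have hrs1 : runStart docs (j + 1) = j + 1 := by
        rw [runStart_succ, if_neg (by simpa using hch)]
      refine ⟨?_, ?_, ?_⟩
      · rw [if_pos (by rw [hc]; exact hch)]; simpa using hrs1.symm
      · rw [if_pos (by rw [hc]; exact hch)]; simp
      · rw [if_pos (by rw [hc]; exact hch)]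
        simp only [Nat.add_sub_cancel] at hs hall ⊢
        rw [hrs1]
        have hlast : procRun org_txt context sep ws (j + 1, j + 1 + 1) =
            [elemAt org_txt context docs sep ws (j + 1)] := by
          unfold procRun elemAt
          rw [hrs1]
          simp
        simp only [List.flatMap_append, List.flatMap_cons, List.flatMap_nil,
          List.append_nil, hs]
        rw [hall, hlast, List.map_append]
        simp
    · -- same document: state unchanged, the open run grows by one
      have heqd : docs.getD n "" = docs.getD (n - 1) "" := not_ne_iff.mp hch
      have hrs1 : runStart docs n = runStart docs (n - 1) := by
        cases n with
        | zero => simp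
        | succ j =>
          simp only [Nat.add_sub_cancel] at heqd ⊢
          rw [runStart_succ, if_pos (by simpa using heqd)]
      refine ⟨?_, ?_, ?_⟩
      · rw [if_neg (by rw [hc]; exact hch)]
        simp only [Nat.add_sub_cancel]
        rw [hrs1]; exact hs
      · rw [if_neg (by rw [hc]; exact hch)]
        simp only [Nat.add_sub_cancel]
        rw [heqd]; exact hc
      · rw [if_neg (by rw [hc]; exact hch)]
        simp only [Nat.add_sub_cancel]
        have hle : runStart docs n ≤ n := runStart_le docs n
        rw [procRun_snoc org_txt context sep ws _ n hle, hrs1, ← List.append_assoc, hall,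
          List.map_append]
        unfold elemAt
        simp [hrs1]

theorem add_context_spec : Claim_equal_add_context := by
  intro org_txt context docs sep_token ws _ _
  simp only [Spec_add_context, add_context, add_context_alt]
  obtain ⟨hs, _, hall⟩ := phase1_inv org_txt context docs (" " ++ sep_token ++ " ") ws
    org_txt.length
  rw [loopA_eq org_txt context docs (" " ++ sep_token ++ " ") ws
        ((org_txt.length - 0) * 2 + (if docs.getD 0 "" == docs.getD 0 "" then 0 else 1))
        0 0 (docs.getD 0 "") [] le_rfl (by simp [runStart])]
  rw [outer_foldl_eq]
  simp only [List.flatMap_append, List.flatMap_cons, List.flatMap_nil, List.append_nil, hs]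
  rw [hall]
  simp [List.range_eq_range']
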